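-- pv_equiv track=rewrite | github.com/richardslab/EXWAS_pipeline | python_scripts/python_helpers/vep_helpers/parse_vep.py | __parse_sift4g_pred
-- ===== SOURCE A (Python) =====
-- def __parse_sift4g_pred(consequence,consequence_elem,SIFT_ORDER):
--   sift_pred = [x.upper().strip() for x in consequence_elem[1].split(",")]
--   sift_pred = [x for x in sift_pred if x!='.']
--   if len(sift_pred) == 0:
--     return None
--   assert(
--     all(
--       [x in SIFT_ORDER for x in sift_pred]
--     )
--   ),f"invalid SIFT results {consequence}"
--
--   # the first occurence is the most severe
--   for i in SIFT_ORDER: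
--     if i in sift_pred:
--       return i
--   assert False
-- ===== SOURCE B (Python) =====
-- def __parse_sift4g_pred(consequence, consequence_elem, SIFT_ORDER):
--   sift_pred = [x.upper().strip() for x in consequence_elem[1].split(",")]
--   sift_pred = [x for x in sift_pred if x != '.']
--   if not sift_pred:
--     return None
--   assert all(x in SIFT_ORDER for x in sift_pred), f"invalid SIFT results {consequence}"
--   return min(sift_pred, key=SIFT_ORDER.index)
-- ===== Notes on version B (the rewrite author's own statement) =====
-- stated objective: idiomatic
-- what changed: The final scan over the fixed priority list SIFT_ORDER looking for the first hit is replaced by a single min() over the prediction values keyed by their rank in SIFT_ORDER, so the unreachable trailing 'assert False' disappears.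
import Mathlib
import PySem

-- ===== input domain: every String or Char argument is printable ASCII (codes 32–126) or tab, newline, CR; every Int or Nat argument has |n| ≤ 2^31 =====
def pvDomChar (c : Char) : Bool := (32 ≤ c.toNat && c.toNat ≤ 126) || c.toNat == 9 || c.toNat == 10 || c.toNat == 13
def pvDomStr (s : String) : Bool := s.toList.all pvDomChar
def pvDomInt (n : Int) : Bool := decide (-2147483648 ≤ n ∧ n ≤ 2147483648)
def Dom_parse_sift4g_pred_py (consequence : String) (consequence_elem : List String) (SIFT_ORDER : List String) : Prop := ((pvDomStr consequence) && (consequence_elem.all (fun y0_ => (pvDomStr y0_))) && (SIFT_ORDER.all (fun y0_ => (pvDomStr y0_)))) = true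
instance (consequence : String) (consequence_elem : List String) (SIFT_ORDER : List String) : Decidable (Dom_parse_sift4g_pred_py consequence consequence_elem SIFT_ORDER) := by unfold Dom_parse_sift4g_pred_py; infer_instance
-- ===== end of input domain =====

-- B replaces A's scan over the fixed priority list SIFT_ORDER by a min over the
-- prediction values keyed by their rank in SIFT_ORDER (objective: idiomatic).

-- ===== PORT A =====
-- 'for i in SIFT_ORDER: if i in sift_pred: return i' (falling through to the
-- unreachable 'assert False', ported as none — excluded by Pre_ anyway since
-- the preceding assert guarantees a hit).
def pvScanA (sift_pred : List String) : List String → Option String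
  | [] => none
  | i :: rest => if sift_pred.contains i then some i else pvScanA sift_pred rest

def parse_sift4g_pred_py (consequence : String) (consequence_elem : List String) (SIFT_ORDER : List String) : Option String :=
  match PySem.List.pyGet? consequence_elem 1 with
  | none => none   -- IndexError: excluded by Pre_
  | some e =>
    let sift_pred := ((PySem.Str.split? e ",").getD []).map (fun x => PySem.Str.strip (PySem.Str.upper x))
    let sift_pred := sift_pred.filter (fun x => decide (x ≠ "."))
    if sift_pred.length = 0 then none
    else if sift_pred.all (fun x => SIFT_ORDER.contains x) then
      pvScanA sift_pred SIFT_ORDER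
    else none   -- AssertionError: excluded by Pre_

-- ===== PORT B =====
-- SIFT_ORDER.index as a total rank (the default is never reached under the
-- preceding all-in-SIFT_ORDER validation).
def pvRank (SIFT_ORDER : List String) (x : String) : Nat :=
  (PySem.List.index? SIFT_ORDER x).getD SIFT_ORDER.length

-- min(sift_pred, key=SIFT_ORDER.index): fold keeping the first element of
-- lowest rank.
def pvMinByRank (SIFT_ORDER : List String) (p : String) (rest : List String) : String :=
  rest.foldl (fun b y => if pvRank SIFT_ORDER y < pvRank SIFT_ORDER b then y else b) p

def parse_sift4g_pred_py_alt (consequence : String) (consequence_elem : List String) (SIFT_ORDER : List String) : Option String :=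
  match PySem.List.pyGet? consequence_elem 1 with
  | none => none   -- IndexError: excluded by Pre_
  | some e =>
    match (((PySem.Str.split? e ",").getD []).map (fun x => PySem.Str.strip (PySem.Str.upper x))).filter (fun x => decide (x ≠ ".")) with
    | [] => none
    | p :: rest =>
      if (p :: rest).all (fun x => SIFT_ORDER.contains x) then
        some (pvMinByRank SIFT_ORDER p rest)
      else none   -- AssertionError: excluded by Pre_

-- ===== PRECONDITION & SPEC =====
-- Pre_ excludes exactly the inputs where the Python A raises: IndexError when
-- consequence_elem has no element 1, and AssertionError when some parsed
-- prediction is not in SIFT_ORDER.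
def Pre_parse_sift4g_pred_py (consequence : String) (consequence_elem : List String) (SIFT_ORDER : List String) : Prop :=
  2 ≤ consequence_elem.length ∧
  ∀ x ∈ (((PySem.Str.split? (consequence_elem.getD 1 "") ",").getD []).map (fun x => PySem.Str.strip (PySem.Str.upper x))).filter (fun x => decide (x ≠ ".")), x ∈ SIFT_ORDER
instance (consequence : String) (consequence_elem : List String) (SIFT_ORDER : List String) : Decidable (Pre_parse_sift4g_pred_py consequence consequence_elem SIFT_ORDER) := by unfold Pre_parse_sift4g_pred_py; infer_instance

def pvWitness_parse_sift4g_pred_py : String × List String × List String :=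
  ("missense_variant", ["SIFT", "deleterious, tolerated"], ["DELETERIOUS", "TOLERATED"])

def Spec_parse_sift4g_pred_py (consequence : String) (consequence_elem : List String) (SIFT_ORDER : List String) (out : Option String) : Prop := out = parse_sift4g_pred_py_alt consequence consequence_elem SIFT_ORDER
instance (consequence : String) (consequence_elem : List String) (SIFT_ORDER : List String) (out : Option String) : Decidable (Spec_parse_sift4g_pred_py consequence consequence_elem SIFT_ORDER out) := by unfold Spec_parse_sift4g_pred_py; infer_instance

-- ===== CLAIM (what is proved, stated in full; the proofs are below) =====
def Claim_equal_parse_sift4g_pred_py : Prop := ∀ (consequence : String) (consequence_elem : List String) (SIFT_ORDER : List String), Dom_parse_sift4g_pred_py consequence consequence_elem SIFT_ORDER → Pre_parse_sift4g_pred_py consequence consequence_elem SIFT_ORDER → Spec_parse_sift4g_pred_py consequence consequence_elem SIFT_ORDER (parse_sift4g_pred_py consequence consequence_elem SIFT_ORDER)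

-- ===== LEMMAS AND PROOFS =====

-- the fold of pvMinByRank returns an element of p :: rest of minimal rank
theorem pvFoldMin_spec (k : String → Nat) :
    ∀ (xs : List String) (b : String),
      (xs.foldl (fun b y => if k y < k b then y else b) b = b ∨
        xs.foldl (fun b y => if k y < k b then y else b) b ∈ xs) ∧
      k (xs.foldl (fun b y => if k y < k b then y else b) b) ≤ k b ∧
      ∀ y ∈ xs, k (xs.foldl (fun b y => if k y < k b then y else b) b) ≤ k y := by
  intro xs
  induction xs with
  | nil => intro b; simp
  | cons x xs ih =>
    intro b
    simp only [List.foldl_cons]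
    by_cases h : k x < k b
    · simp only [if_pos h]
      obtain ⟨hmem, hle, hall⟩ := ih x
      refine ⟨?_, by omega, ?_⟩
      · rcases hmem with h1 | h1 <;> simp [h1]
      · intro y hy
        rcases List.mem_cons.mp hy with rfl | hy
        · exact hle
        · exact hall y hy
    · simp only [if_neg h]
      obtain ⟨hmem, hle, hall⟩ := ih b
      refine ⟨?_, hle, ?_⟩
      · rcases hmem with h1 | h1 <;> simp [h1]
      · intro y hy
        rcases List.mem_cons.mp hy with rfl | hy
        · omega
        · exact hall y hy

-- the fold only depends on the strict comparison of the keys on the elements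
theorem pvFoldMin_congr (k1 k2 : String → Nat) (S : List String)
    (hk : ∀ x ∈ S, ∀ y ∈ S, (k1 y < k1 x ↔ k2 y < k2 x)) :
    ∀ (xs : List String) (b : String), b ∈ S → (∀ x ∈ xs, x ∈ S) →
      xs.foldl (fun b y => if k1 y < k1 b then y else b) b =
      xs.foldl (fun b y => if k2 y < k2 b then y else b) b := by
  intro xs
  induction xs with
  | nil => intro b _ _; rfl
  | cons x xs ih =>
    intro b hb hxs
    have hx : x ∈ S := hxs x (by simp)
    have hcond : (k1 x < k1 b) ↔ (k2 x < k2 b) := hk b hb x hx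
    simp only [List.foldl_cons]
    by_cases h : k2 x < k2 b
    · rw [if_pos (hcond.mpr h), if_pos h]
      exact ih x hx (fun z hz => hxs z (by simp [hz]))
    · rw [if_neg (fun h1 => h (hcond.mp h1)), if_neg h]
      exact ih b hb (fun z hz => hxs z (by simp [hz]))

theorem pvRank_cons_zero (o : String) (os : List String) (b : String)
    (h : pvRank (o :: os) b = 0) : b = o := by
  by_cases hob : o = b
  · exact hob.symm
  · exfalso
    unfold pvRank at h
    rw [PySem.List.index?_cons_of_ne os hob] at h
    cases hidx : PySem.List.index? os b with
    | none => rw [hidx] at h; simp at h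
    | some i => rw [hidx] at h; simp at h

theorem pvScan_eq_min :
    ∀ (ord : List String) (p : String) (rest : List String),
      (∀ x ∈ p :: rest, x ∈ ord) →
      pvScanA (p :: rest) ord = some (pvMinByRank ord p rest) := by
  intro ord
  induction ord with
  | nil => intro p rest hall; exact absurd (hall p (by simp)) (by simp)
  | cons o os ih =>
    intro p rest hall
    unfold pvScanA
    by_cases h : (p :: rest).contains o
    · simp only [if_pos h]
      -- the minimum has rank ≤ rank o = 0, hence equals o
      have ho : o ∈ p :: rest := by simpa using h
      obtain ⟨hmem, hle, hmin⟩ := pvFoldMin_spec (pvRank (o :: os)) rest p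
      have hro : pvRank (o :: os) o = 0 := by
        unfold pvRank; rw [PySem.List.index?_cons_self]; rfl
      have hr0 : pvRank (o :: os) (pvMinByRank (o :: os) p rest) = 0 := by
        unfold pvMinByRank
        rcases List.mem_cons.mp ho with rfl | ho'
        · omega
        · have := hmin o ho'; omega
      rw [pvRank_cons_zero o os _ hr0]
    · simp only [if_neg h]
      have hno : o ∉ p :: rest := by simpa using h
      have hall' : ∀ x ∈ p :: rest, x ∈ os := by
        intro x hx
        rcases List.mem_cons.mp (hall x hx) with rfl | hos
        · exact absurd hx hno
        · exact hos
      rw [ih p rest hall']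
      -- ranks in o :: os are ranks in os shifted by one on all of p :: rest
      have hshift : ∀ x ∈ p :: rest, pvRank (o :: os) x = pvRank os x + 1 := by
        intro x hx
        have hne : o ≠ x := fun he => hno (he ▸ hx)
        unfold pvRank
        rw [PySem.List.index?_cons_of_ne os hne]
        cases hidx : PySem.List.index? os x with
        | none => simp
        | some i => simp
      have : pvMinByRank (o :: os) p rest = pvMinByRank os p rest := by
        unfold pvMinByRank
        exact pvFoldMin_congr (pvRank (o :: os)) (pvRank os) (p :: rest)
          (fun x hx y hy => by rw [hshift x hx, hshift y hy]; omega)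
          rest p (by simp) (fun z hz => by simp [hz])
      rw [this]

-- ===== VERDICT (by name: the statement is the Claim_ definition above) =====
theorem parse_sift4g_pred_py_spec : Claim_equal_parse_sift4g_pred_py := by
  intro consequence consequence_elem SIFT_ORDER _ _
  unfold Spec_parse_sift4g_pred_py parse_sift4g_pred_py parse_sift4g_pred_py_alt
  cases he : PySem.List.pyGet? consequence_elem 1 with
  | none => rfl
  | some e =>
    simp only []
    cases hf : (((PySem.Str.split? e ",").getD []).map (fun x => PySem.Str.strip (PySem.Str.upper x))).filter (fun x => decide (x ≠ ".")) with
    | nil => simp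
    | cons p rest =>
      simp only [List.length_cons]
      have hlen : ¬ (rest.length + 1 = 0) := by omega
      rw [if_neg hlen]
      by_cases hall : (p :: rest).all (fun x => SIFT_ORDER.contains x)
      · rw [if_pos hall, if_pos hall]
        exact pvScan_eq_min SIFT_ORDER p rest
          (fun x hx => by
            have := List.all_eq_true.mp hall x hx
            simpa using this)
      · rw [if_neg hall, if_neg hall]
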